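-- pv_equiv track=rewrite | github.com/orlandoisepic/walsh-transformator | utility/utils.py | calc_nu_mu
-- ===== SOURCE A (Python) =====
-- def calc_nu_mu(number: int) -> tuple[int, int]:
--     """
--     Calculates nu (the number of 1-bits in the binary representation of the given number)
--     and mu (the exponents+1 of the 1-bits) of the given number.
--     The definition of nu and mu comes from the paper
--         'Formulas for the Walsh coefficients of smooth functions and their application to bounds on the Walsh coefficients'
--     :param number: The number to calculate nu and mu for.
--     :return: A tuple with nu and mu.
--     """
--     number = int(number)
--     ones_count = 0
--     exponent_sum = 0
--     while number:
--         dropped_bit = number & -number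
--         pos = dropped_bit.bit_length() - 1
--         exponent_sum += pos
--         ones_count += 1
--         number &= number - 1
--     return ones_count, exponent_sum + ones_count
-- ===== SOURCE B (Python) =====
-- def calc_nu_mu(number: int) -> tuple[int, int]:
--     """Scan every bit position via right shifts instead of isolating lowest set bits."""
--     number = int(number)
--     ones_count = 0
--     exponent_sum = 0
--     i = 0
--     while number:
--         if number & 1:
--             ones_count += 1
--             exponent_sum += i
--         number >>= 1
--         i += 1
--     return ones_count, exponent_sum + ones_count
-- ===== Notes on version B (the rewrite author's own statement) =====
-- stated objective: idiomatic
-- what changed: B scans every bit position with a right-shift/bit-test loop accumulating the position index, instead of A's isolating each lowest set bit with n & -n and locating it with bit_length.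
import Mathlib
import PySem

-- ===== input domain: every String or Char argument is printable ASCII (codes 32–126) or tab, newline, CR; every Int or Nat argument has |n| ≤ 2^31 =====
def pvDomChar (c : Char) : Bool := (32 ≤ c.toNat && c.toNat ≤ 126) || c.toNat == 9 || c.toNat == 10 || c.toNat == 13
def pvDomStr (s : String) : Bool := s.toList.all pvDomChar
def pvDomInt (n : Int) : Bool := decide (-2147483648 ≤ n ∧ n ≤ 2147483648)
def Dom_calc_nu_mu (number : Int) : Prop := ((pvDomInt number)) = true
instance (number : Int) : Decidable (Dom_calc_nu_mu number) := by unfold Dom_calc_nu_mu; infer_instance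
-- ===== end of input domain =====

-- B scans every bit position with a right-shift/bit-test loop accumulating the position
-- index, instead of A's isolating each lowest set bit with n & -n and bit_length.

-- ===== PORT A =====
-- loop state: (number, ones_count, exponent_sum); `while number:` with nonnegative number
-- terminates because clearing the lowest set bit decreases number.  For number < 0 the
-- Python loop never terminates; that branch (excluded by Pre_) just returns the accumulators.
def calcALoop (n ones exps : Int) : Int × Int :=
  if n = 0 then (ones, exps + ones)
  else if h : 0 < n then
    let dropped := Int.land n (-n)                    -- number & -number
    let pos : Int := ((dropped.toNat.log2 + 1 : Int) - 1)  -- bit_length() - 1 (dropped > 0, so bit_length = log2 + 1)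
    calcALoop (Int.land n (n - 1)) (ones + 1) (exps + pos)
  else (ones, exps + ones)                            -- n < 0: Python diverges, outside Pre_
termination_by n.toNat
decreasing_by
  obtain ⟨a, rfl⟩ := Int.eq_ofNat_of_zero_le (le_of_lt h)
  have ha : 0 < a := by exact_mod_cast h
  have h1 : ((a : Int) - 1) = ((a - 1 : Nat) : Int) := by omega
  rw [h1, show Int.land (a:Int) (((a-1:Nat)):Int) = ((a &&& (a-1) : Nat) : Int) from rfl]
  simp only [Int.toNat_natCast]
  have h2 : a &&& (a - 1) ≤ a - 1 := Nat.and_le_right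
  omega

def calc_nu_mu (number : Int) : Int × Int :=
  calcALoop number 0 0

-- ===== PORT B =====
-- loop state: (number, i, ones_count, exponent_sum); `number >>= 1` is Int.shiftRight
-- (arithmetic shift, exact for Python's >>).  For number < 0 the Python loop never
-- terminates; that branch (excluded by Pre_) just returns the accumulators.
def calcBLoop (n i ones exps : Int) : Int × Int :=
  if n = 0 then (ones, exps + ones)
  else if h : 0 < n then
    let p := if Int.land n 1 ≠ 0 then (ones + 1, exps + i) else (ones, exps)  -- if number & 1:
    calcBLoop (Int.shiftRight n 1) (i + 1) p.1 p.2
  else (ones, exps + ones)                            -- n < 0: Python diverges, outside Pre_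
termination_by n.toNat
decreasing_by
  obtain ⟨a, rfl⟩ := Int.eq_ofNat_of_zero_le (le_of_lt h)
  have ha : 0 < a := by exact_mod_cast h
  rw [show Int.shiftRight (a:Int) 1 = ((a >>> 1 : Nat) : Int) from rfl]
  simp only [Int.toNat_natCast, Nat.shiftRight_succ, Nat.shiftRight_zero]
  omega

def calc_nu_mu_alt (number : Int) : Int × Int :=
  calcBLoop number 0 0 0

-- ===== PRECONDITION & SPEC =====
-- Pre_ excludes negative numbers, where Python A's (and B's) while-loop never terminates;
-- A returns on every input admitted by Pre_.
def Pre_calc_nu_mu (number : Int) : Prop := 0 ≤ number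
instance (number : Int) : Decidable (Pre_calc_nu_mu number) := by unfold Pre_calc_nu_mu; infer_instance
def pvWitness_calc_nu_mu : Int := 13

def Spec_calc_nu_mu (number : Int) (out : Int × Int) : Prop := out = calc_nu_mu_alt number
instance (number : Int) (out : Int × Int) : Decidable (Spec_calc_nu_mu number out) := by unfold Spec_calc_nu_mu; infer_instance

-- ===== CLAIM (what is proved, stated in full; the proofs are below) =====
def Claim_equal_calc_nu_mu : Prop := ∀ (number : Int), Dom_calc_nu_mu number → Pre_calc_nu_mu number → Spec_calc_nu_mu number (calc_nu_mu number)

-- ===== LEMMAS AND PROOFS =====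

-- popcount of n (number of 1-bits), by halving
def pvPc (n : Nat) : Int :=
  if h : n = 0 then 0 else pvPc (n / 2) + ((n % 2 : Nat) : Int)
decreasing_by omega

-- sum of the positions of the 1-bits of n
def pvEs (n : Nat) : Int :=
  if h : n = 0 then 0 else pvEs (n / 2) + pvPc (n / 2)
decreasing_by omega

theorem pvPc_zero : pvPc 0 = 0 := by rw [pvPc]; simp

theorem pvEs_zero : pvEs 0 = 0 := by rw [pvEs]; simp

theorem pvPc_two_mul (k : Nat) : pvPc (2 * k) = pvPc k := by
  rcases Nat.eq_zero_or_pos k with h | h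
  · subst h; simp
  · rw [pvPc]
    have h2 : ¬ (2 * k = 0) := by omega
    simp [h2, Nat.mul_div_cancel_left k (by norm_num : 0 < 2), Nat.mul_mod_right]

theorem pvPc_two_mul_add_one (k : Nat) : pvPc (2 * k + 1) = pvPc k + 1 := by
  rw [pvPc]
  have h2 : ¬ (2 * k + 1 = 0) := by omega
  have hd : (2 * k + 1) / 2 = k := by omega
  have hm : (2 * k + 1) % 2 = 1 := by omega
  simp [h2, hd, hm]

theorem pvEs_two_mul (k : Nat) : pvEs (2 * k) = pvEs k + pvPc k := by
  rcases Nat.eq_zero_or_pos k with h | h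
  · subst h; simp [pvEs_zero, pvPc_zero]
  · rw [pvEs]
    have h2 : ¬ (2 * k = 0) := by omega
    simp [h2, Nat.mul_div_cancel_left k (by norm_num : 0 < 2)]

theorem pvEs_two_mul_add_one (k : Nat) : pvEs (2 * k + 1) = pvEs k + pvPc k := by
  rw [pvEs]
  have h2 : ¬ (2 * k + 1 = 0) := by omega
  have hd : (2 * k + 1) / 2 = k := by omega
  simp [h2, hd]

-- n & (n-1) clears the lowest set bit: the two structural cases
theorem land_pred_odd (a : Nat) (h : a % 2 = 1) : a &&& (a - 1) = a - 1 := by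
  apply Nat.eq_of_testBit_eq
  intro i
  cases i with
  | zero =>
      have h0 : (a - 1) % 2 = 0 := by omega
      rw [Nat.testBit_land]
      simp [Nat.testBit_zero, h, h0]
  | succ j =>
      have d : a / 2 = (a - 1) / 2 := by omega
      rw [Nat.testBit_land]
      simp only [Nat.testBit_succ, d, Bool.and_self]

theorem land_pred_even (k : Nat) (hk : 0 < k) :
    (2 * k) &&& (2 * k - 1) = 2 * (k &&& (k - 1)) := by
  apply Nat.eq_of_testBit_eq
  intro i
  cases i with
  | zero =>
      have h0 : (2 * k) % 2 = 0 := by omega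
      have h1 : (2 * (k &&& (k - 1))) % 2 = 0 := by omega
      rw [Nat.testBit_land]
      simp [Nat.testBit_zero, h0, h1]
  | succ j =>
      have d1 : (2 * k) / 2 = k := by omega
      have d2 : (2 * k - 1) / 2 = k - 1 := by omega
      have d3 : (2 * (k &&& (k - 1))) / 2 = k &&& (k - 1) := by omega
      rw [Nat.testBit_land]
      simp only [Nat.testBit_succ, d1, d2, d3]
      rw [Nat.testBit_land]

-- n & -n isolates the lowest set bit; on Int it reduces to Nat.ldiff n (n-1)
theorem ldiff_pred_odd (a : Nat) (h : a % 2 = 1) : Nat.ldiff a (a - 1) = 1 := by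
  apply Nat.eq_of_testBit_eq
  intro i
  cases i with
  | zero =>
      have h0 : (a - 1) % 2 = 0 := by omega
      rw [Nat.testBit_ldiff]
      simp [Nat.testBit_zero, h, h0]
  | succ j =>
      have d : a / 2 = (a - 1) / 2 := by omega
      rw [Nat.testBit_ldiff]
      simp only [Nat.testBit_succ, d, Nat.reduceDiv]
      cases ((a - 1) / 2).testBit j <;> simp

theorem ldiff_pred_even (k : Nat) (hk : 0 < k) :
    Nat.ldiff (2 * k) (2 * k - 1) = 2 * Nat.ldiff k (k - 1) := by
  apply Nat.eq_of_testBit_eq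
  intro i
  cases i with
  | zero =>
      have h0 : (2 * k) % 2 = 0 := by omega
      have h1 : (2 * Nat.ldiff k (k - 1)) % 2 = 0 := by omega
      rw [Nat.testBit_ldiff]
      simp [Nat.testBit_zero, h0, h1]
  | succ j =>
      have d1 : (2 * k) / 2 = k := by omega
      have d2 : (2 * k - 1) / 2 = k - 1 := by omega
      have d3 : (2 * Nat.ldiff k (k - 1)) / 2 = Nat.ldiff k (k - 1) := by omega
      rw [Nat.testBit_ldiff]
      simp only [Nat.testBit_succ, d1, d2, d3]
      rw [Nat.testBit_ldiff]

theorem ldiff_pred_pos (a : Nat) (h : 0 < a) : 0 < Nat.ldiff a (a - 1) := by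
  induction a using Nat.strong_induction_on with
  | _ a ih =>
    rcases Nat.even_or_odd a with he | ho
    · have hm0 : a % 2 = 0 := Nat.even_iff.mp he
      obtain ⟨k, rfl⟩ : ∃ k, a = 2 * k := ⟨a / 2, by omega⟩
      have hk : 0 < k := by omega
      rw [ldiff_pred_even k hk]
      have := ih k (by omega) hk
      omega
    · have h1 : a % 2 = 1 := Nat.odd_iff.mp ho
      rw [ldiff_pred_odd a h1]; omega

theorem log2_two_mul (x : Nat) (h : 0 < x) : Nat.log2 (2 * x) = Nat.log2 x + 1 := by
  rw [Nat.log2_eq_log_two, Nat.log2_eq_log_two, Nat.mul_comm,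
    Nat.log_mul_base (by norm_num) (by omega)]

-- the position of the lowest set bit, as A computes it
def pvPos (a : Nat) : Int := ((Nat.ldiff a (a - 1)).log2 : Nat)

theorem pvPos_odd (a : Nat) (h : a % 2 = 1) : pvPos a = 0 := by
  unfold pvPos
  rw [ldiff_pred_odd a h]
  simp [Nat.log2]

theorem pvPos_even (k : Nat) (hk : 0 < k) : pvPos (2 * k) = pvPos k + 1 := by
  unfold pvPos
  rw [ldiff_pred_even k hk, log2_two_mul _ (ldiff_pred_pos k hk)]
  push_cast
  ring

-- clearing the lowest set bit: effect on popcount and on the position sum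
theorem clear_bit_key (a : Nat) (h : 0 < a) :
    pvPc (a &&& (a - 1)) + 1 = pvPc a ∧ pvEs (a &&& (a - 1)) + pvPos a = pvEs a := by
  induction a using Nat.strong_induction_on with
  | _ a ih =>
    rcases Nat.even_or_odd a with he | ho
    · have hm0 : a % 2 = 0 := Nat.even_iff.mp he
      obtain ⟨k, rfl⟩ : ∃ k, a = 2 * k := ⟨a / 2, by omega⟩
      have hk : 0 < k := by omega
      obtain ⟨ih1, ih2⟩ := ih k (by omega) hk
      rw [land_pred_even k hk, pvPos_even k hk, pvPc_two_mul, pvPc_two_mul,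
        pvEs_two_mul, pvEs_two_mul]
      constructor
      · exact ih1
      · omega
    · have h1 : a % 2 = 1 := Nat.odd_iff.mp ho
      obtain ⟨k, rfl⟩ : ∃ k, a = 2 * k + 1 := ⟨a / 2, by omega⟩
      rw [land_pred_odd _ h1, pvPos_odd _ h1,
        show 2 * k + 1 - 1 = 2 * k by omega,
        pvPc_two_mul, pvPc_two_mul_add_one, pvEs_two_mul, pvEs_two_mul_add_one]
      omega

-- cast plumbing: the Int bit operations A and B perform, on a nonnegative value
theorem land_coe (a b : Nat) : Int.land (a : Int) (b : Int) = ((a &&& b : Nat) : Int) := rfl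

theorem land_neg_coe (a : Nat) (h : 0 < a) :
    Int.land (a : Int) (-(a : Int)) = ((Nat.ldiff a (a - 1) : Nat) : Int) := by
  obtain ⟨b, rfl⟩ : ∃ b, a = b + 1 := ⟨a - 1, by omega⟩
  rfl

theorem shiftRight_coe (a : Nat) : Int.shiftRight (a : Int) 1 = ((a / 2 : Nat) : Int) := by
  rw [show Int.shiftRight (a : Int) 1 = ((a >>> 1 : Nat) : Int) from rfl,
    Nat.shiftRight_succ, Nat.shiftRight_zero]

-- A's loop computes (ones + ν, exps + μ-sum + final ones)
theorem calcALoop_eq (a : Nat) : ∀ (o e : Int),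
    calcALoop (a : Int) o e = (o + pvPc a, e + pvEs a + (o + pvPc a)) := by
  induction a using Nat.strong_induction_on with
  | _ a ih =>
    intro o e
    rcases Nat.eq_zero_or_pos a with h0 | hpos
    · subst h0
      rw [calcALoop]
      simp [pvPc_zero, pvEs_zero]
    · rw [calcALoop]
      have hne : ¬ ((a : Int) = 0) := by simp; omega
      have hlt : (0 : Int) < (a : Int) := by exact_mod_cast hpos
      simp only [hne, if_false, hlt, dif_pos]
      rw [land_neg_coe a hpos,
        show ((a : Int) - 1) = ((a - 1 : Nat) : Int) by omega,
        land_coe]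
      have hdec : a &&& (a - 1) < a := by
        have h2 : a &&& (a - 1) ≤ a - 1 := Nat.and_le_right
        omega
      rw [ih _ hdec]
      obtain ⟨k1, k2⟩ := clear_bit_key a hpos
      have hpose : ((((Nat.ldiff a (a - 1) : Nat) : Int)).toNat.log2 + 1 - 1 : Int) = pvPos a := by
        unfold pvPos
        simp
      rw [hpose, Prod.mk.injEq]
      constructor <;> omega

-- B's loop computes the same, with the position index carried in i
theorem calcBLoop_eq (a : Nat) : ∀ (i o e : Int),
    calcBLoop (a : Int) i o e = (o + pvPc a, e + pvEs a + i * pvPc a + (o + pvPc a)) := by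
  induction a using Nat.strong_induction_on with
  | _ a ih =>
    intro i o e
    rcases Nat.eq_zero_or_pos a with h0 | hpos
    · subst h0
      rw [calcBLoop]
      simp [pvPc_zero, pvEs_zero]
    · rw [calcBLoop]
      have hne : ¬ ((a : Int) = 0) := by simp; omega
      have hlt : (0 : Int) < (a : Int) := by exact_mod_cast hpos
      simp only [hne, if_false, hlt, dif_pos]
      rw [show (1 : Int) = ((1 : Nat) : Int) from rfl, land_coe, shiftRight_coe]
      have hdec : a / 2 < a := by omega
      have hand : a &&& 1 = a % 2 := Nat.and_one_is_mod a
      rcases Nat.even_or_odd a with he | ho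
      · have hm : a % 2 = 0 := Nat.even_iff.mp he
        have hb : ¬ (((a &&& 1 : Nat) : Int) ≠ 0) := by simp [hand, hm]
        simp only [hb, if_false, ih _ hdec]
        obtain ⟨k, rfl⟩ : ∃ k, a = 2 * k := ⟨a / 2, by omega⟩
        rw [show 2 * k / 2 = k by omega, pvPc_two_mul, pvEs_two_mul, Prod.mk.injEq]
        constructor <;> ring
      · have hm : a % 2 = 1 := Nat.odd_iff.mp ho
        have hb : (((a &&& 1 : Nat) : Int) ≠ 0) := by simp [hand, hm]
        rw [if_pos hb]
        simp only [ih _ hdec]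
        obtain ⟨k, rfl⟩ : ∃ k, a = 2 * k + 1 := ⟨a / 2, by omega⟩
        rw [show (2 * k + 1) / 2 = k by omega, pvPc_two_mul_add_one, pvEs_two_mul_add_one,
          Prod.mk.injEq]
        constructor <;> ring

-- ===== VERDICT (by name: the statement is the Claim_ definition above) =====
theorem calc_nu_mu_spec : Claim_equal_calc_nu_mu := by
  intro number _ hpre
  unfold Spec_calc_nu_mu calc_nu_mu calc_nu_mu_alt
  obtain ⟨a, rfl⟩ := Int.eq_ofNat_of_zero_le hpre
  rw [calcALoop_eq, calcBLoop_eq, Prod.mk.injEq]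
  constructor <;> ring
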